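-- pv_equiv track=rewrite | github.com/Tianxiang-Li/search-engine | implementation/index_builder.py | phrase_builder
-- ===== SOURCE A (Python) =====
-- def phrase_builder(phrases, d_id):
--     phrase_dic = {}
--     for phrase in phrases:
--         if phrase not in phrase_dic:
--             phrase_dic[phrase] = [[d_id, 1]]
--         else:
--             phrase_dic[phrase][0][1] += 1
--     return phrase_dic
-- ===== SOURCE B (Python) =====
-- def phrase_builder(phrases, d_id):
--     # Dedupe preserving first-occurrence order, then count each distinct
--     # phrase with a separate scan of the input; no running counter is kept.
--     return {p: [[d_id, phrases.count(p)]] for p in dict.fromkeys(phrases)}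
-- ===== Notes on version B (the rewrite author's own statement) =====
-- stated objective: alternative
-- what changed: B keeps no running counter at all: it first deduplicates the phrases preserving first-occurrence order (dict.fromkeys) and then counts each distinct phrase with its own list.count scan, trading A's single mutating-dict pass for a dedupe-then-count nested-scan scheme.
import Mathlib
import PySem

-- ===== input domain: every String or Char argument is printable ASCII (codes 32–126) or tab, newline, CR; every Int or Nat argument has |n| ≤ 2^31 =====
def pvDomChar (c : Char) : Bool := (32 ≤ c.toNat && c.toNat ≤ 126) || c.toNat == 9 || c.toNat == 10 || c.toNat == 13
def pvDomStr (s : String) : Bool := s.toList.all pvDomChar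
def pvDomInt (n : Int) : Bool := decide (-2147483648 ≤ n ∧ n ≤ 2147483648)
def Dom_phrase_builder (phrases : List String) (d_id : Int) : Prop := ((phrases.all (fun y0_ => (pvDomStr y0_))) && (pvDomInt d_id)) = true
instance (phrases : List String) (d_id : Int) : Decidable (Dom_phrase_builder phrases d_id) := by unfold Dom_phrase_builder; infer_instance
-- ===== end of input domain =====

-- B deduplicates the phrases (first-occurrence order) and then counts each distinct phrase
-- by a separate scan of the input; A keeps one mutating dict of nested [[d_id, n]] lists.

-- ===== PORT A =====
-- loop body of A: create [[d_id, 1]] for a new phrase, else increment the nested counter in place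
def pvStepA (d_id : Int) (d : PySem.Dict String (List (List Int))) (phrase : String) :
    PySem.Dict String (List (List Int)) :=
  if d.contains phrase = false then
    d.insert phrase [[d_id, 1]]
  else
    -- phrase_dic[phrase][0][1] += 1  (read the nested list, bump index 1 of its first element)
    let v := d.getD phrase []
    let inner := PySem.List.pyGetD v 0 []
    let inner' := PySem.List.pySetD inner 1 (PySem.List.pyGetD inner 1 0 + 1)
    d.insert phrase (PySem.List.pySetD v 0 inner')

def phrase_builder (phrases : List String) (d_id : Int) : List (String × List (List Int)) :=
  (phrases.foldl (pvStepA d_id) PySem.Dict.empty).items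

-- ===== PORT B =====
-- dict.fromkeys(phrases) = the distinct phrases in first-occurrence order (PySem.Set.ofList);
-- phrases.count(p) = PySem.List.count
def phrase_builder_alt (phrases : List String) (d_id : Int) : List (String × List (List Int)) :=
  (PySem.Set.ofList phrases).map (fun p => (p, [[d_id, PySem.List.count phrases p]]))

-- ===== PRECONDITION & SPEC =====
def Spec_phrase_builder (phrases : List String) (d_id : Int) (out : List (String × List (List Int))) : Prop := out = phrase_builder_alt phrases d_id
instance (phrases : List String) (d_id : Int) (out : List (String × List (List Int))) : Decidable (Spec_phrase_builder phrases d_id out) := by unfold Spec_phrase_builder; infer_instance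

-- ===== CLAIM (what is proved, stated in full; the proofs are below) =====
def Claim_equal_phrase_builder : Prop := ∀ (phrases : List String) (d_id : Int), Dom_phrase_builder phrases d_id → Spec_phrase_builder phrases d_id (phrase_builder phrases d_id)

-- ===== LEMMAS AND PROOFS =====

-- characterisation of A's accumulated dict: items = distinct phrases paired with [[d_id, count]]
lemma itemsA (d_id : Int) (l : List String) :
    (l.foldl (pvStepA d_id) PySem.Dict.empty).items
      = (PySem.Set.ofList l).map (fun k => (k, [[d_id, (l.count k : Int)]])) := by
  induction l using List.reverseRecOn with
  | nil => rfl
  | append_singleton l x ih =>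
    rw [List.foldl_append]
    set d := l.foldl (pvStepA d_id) PySem.Dict.empty with hd
    have hkeys : d.keys = PySem.Set.ofList l := by
      simp only [PySem.Dict.keys, ih, List.map_map]
      exact List.map_id _
    have hnodup : d.keys.Nodup := hkeys ▸ PySem.Set.nodup_ofList l
    have hcont : d.contains x = decide (x ∈ PySem.Set.ofList l) := by
      rw [PySem.Dict.contains_eq_decide_mem_keys, hkeys]
    by_cases hx : x ∈ l
    · have hxs : x ∈ PySem.Set.ofList l := (PySem.Set.mem_ofList l x).2 hx
      have hgetD : d.getD x [] = [[d_id, (l.count x : Int)]] := by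
        apply PySem.Dict.getD_of_mem_items d _ hnodup
        rw [ih]
        exact List.mem_map.2 ⟨x, hxs, rfl⟩
      simp only [List.foldl_cons, List.foldl_nil, pvStepA, hcont, hxs, decide_true,
        Bool.true_eq_false, if_false, hgetD]
      rw [PySem.Dict.items_insert_of_contains d _ (by rw [hcont]; simp [hxs]), ih]
      rw [PySem.Set.ofList_append_singleton, PySem.Set.add_of_mem hxs, List.map_map]
      apply List.map_congr_left
      intro k hk
      by_cases hkx : k = x
      · subst hkx
        simp only [Function.comp_apply, beq_self_eq_true, if_true, List.count_append]
        simp [PySem.List.pyGetD, PySem.List.pySetD, PySem.List.pySet?, PySem.List.pyIdx?]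
      · have : (k == x) = false := by simp [hkx]
        simp only [Function.comp_apply, this, Bool.false_eq_true, if_false, List.count_append]
        have : x ≠ k := fun h => hkx h.symm
        simp [this]
    · have hxs : x ∉ PySem.Set.ofList l := fun h => hx ((PySem.Set.mem_ofList l x).1 h)
      simp only [List.foldl_cons, List.foldl_nil, pvStepA, hcont, hxs, decide_false, if_true]
      rw [PySem.Dict.items_insert_of_not_contains d _ (by rw [hcont]; simp [hxs]), ih]
      rw [PySem.Set.ofList_append_singleton, PySem.Set.add_of_not_mem hxs, List.map_append]
      congr 1
      · apply List.map_congr_left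
        intro k hk
        have hne : x ≠ k := fun h => hxs (h ▸ hk)
        simp [List.count_append, hne]
      · simp [List.count_append, List.count_eq_zero_of_not_mem hx]

-- ===== VERDICT =====
theorem phrase_builder_spec : Claim_equal_phrase_builder := by
  intro phrases d_id _
  show phrase_builder phrases d_id = phrase_builder_alt phrases d_id
  rw [phrase_builder, phrase_builder_alt, itemsA]
  rfl
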